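-- pv_equiv track=rewrite | github.com/yuvaraj030/project-prometheus | context_compressor.py | _snip
-- ===== SOURCE A (Python) =====
-- def _snip(msgs):
--     out=[]
--     for m in msgs:
--         c=str(m.get("content",""))
--         if not c.strip():continue
--         if out and out[-1].get("role")==m.get("role") and str(out[-1].get("content",""))[:80]==c[:80]:continue
--         out.append(m)
--     return out
-- ===== SOURCE B (Python) =====
-- def _snip(msgs):
--     kept = [m for m in msgs if str(m.get("content", "")).strip()]
--     out = kept[:1]
--     for prev, cur in zip(kept, kept[1:]):
--         if prev.get("role") == cur.get("role") and str(prev.get("content", ""))[:80] == str(cur.get("content", ""))[:80]: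
--             continue
--         out.append(cur)
--     return out
-- ===== Notes on version B (the rewrite author's own statement) =====
-- stated objective: alternative
-- what changed: A's single fused pass with an out[-1] check is split into a filter pass over msgs followed by an adjacent-pair collapse over zip(kept, kept[1:]), whose correctness rests on (role, content[:80]) equality being an equivalence relation.
import Mathlib
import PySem

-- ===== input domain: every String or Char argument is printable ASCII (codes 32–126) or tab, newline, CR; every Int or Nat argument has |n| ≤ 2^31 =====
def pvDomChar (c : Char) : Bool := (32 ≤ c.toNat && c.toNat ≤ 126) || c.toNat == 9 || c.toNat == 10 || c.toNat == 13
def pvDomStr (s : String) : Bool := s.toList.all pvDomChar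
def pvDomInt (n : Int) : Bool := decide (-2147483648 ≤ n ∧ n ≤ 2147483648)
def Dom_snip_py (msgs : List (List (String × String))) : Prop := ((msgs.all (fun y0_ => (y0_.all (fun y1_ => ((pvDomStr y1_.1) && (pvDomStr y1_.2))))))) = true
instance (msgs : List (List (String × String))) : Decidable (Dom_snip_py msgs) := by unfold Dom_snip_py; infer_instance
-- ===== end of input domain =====

-- B splits A's fused loop into a filter pass plus an adjacent-pair collapse (alternative decomposition, same cost).

-- m.get(k, d) / m.get(k) on the association-list dict
def pvGetD (m : List (String × String)) (k d : String) : String := PySem.Dict.getD ⟨m⟩ k d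
def pvGet? (m : List (String × String)) (k : String) : Option String := PySem.Dict.get? ⟨m⟩ k

-- ===== PORT A =====
def snip_py (msgs : List (List (String × String))) : List (List (String × String)) :=
  msgs.foldl (fun out m =>
    let c := pvGetD m "content" ""
    if PySem.Str.strip c = "" then out
    else
      match out.getLast? with   -- 'out and out[-1] …'
      | none => out ++ [m]
      | some last =>
        if pvGet? last "role" = pvGet? m "role" ∧
           PySem.Str.slice (pvGetD last "content" "") none (some 80) = PySem.Str.slice c none (some 80)
        then out else out ++ [m]) []

-- ===== PORT B =====
def snip_py_alt (msgs : List (List (String × String))) : List (List (String × String)) :=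
  let kept := msgs.filter (fun m => !(PySem.Str.strip (pvGetD m "content" "") == ""))
  let out0 := kept.take 1   -- kept[:1]
  (kept.zip kept.tail).foldl (fun out pc =>
    if pvGet? pc.1 "role" = pvGet? pc.2 "role" ∧
       PySem.Str.slice (pvGetD pc.1 "content" "") none (some 80) = PySem.Str.slice (pvGetD pc.2 "content" "") none (some 80)
    then out else out ++ [pc.2]) out0

-- ===== PRECONDITION & SPEC =====
def Spec_snip_py (msgs : List (List (String × String))) (out : List (List (String × String))) : Prop := out = snip_py_alt msgs
instance (msgs : List (List (String × String))) (out : List (List (String × String))) : Decidable (Spec_snip_py msgs out) := by unfold Spec_snip_py; infer_instance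

-- ===== CLAIM (what is proved, stated in full; the proofs are below) =====
def Claim_equal_snip_py : Prop := ∀ (msgs : List (List (String × String))), Dom_snip_py msgs → Spec_snip_py msgs (snip_py msgs)

-- ===== LEMMAS AND PROOFS =====

-- the (role, content[:80]) key both comparisons test
def pvKey (m : List (String × String)) : Option String × String :=
  (pvGet? m "role", PySem.Str.slice (pvGetD m "content" "") none (some 80))

theorem pvCond_iff (p m : List (String × String)) :
    (pvGet? p "role" = pvGet? m "role" ∧
     PySem.Str.slice (pvGetD p "content" "") none (some 80) = PySem.Str.slice (pvGetD m "content" "") none (some 80))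
    ↔ pvKey p = pvKey m := by
  unfold pvKey
  constructor
  · rintro ⟨h1, h2⟩; simp [h1, h2]
  · intro h; exact ⟨congrArg Prod.fst h, congrArg Prod.snd h⟩

-- A's step on the already-filtered list
def pvStepC (out : List (List (String × String))) (m : List (String × String)) : List (List (String × String)) :=
  match out.getLast? with
  | none => out ++ [m]
  | some last =>
    if pvGet? last "role" = pvGet? m "role" ∧
       PySem.Str.slice (pvGetD last "content" "") none (some 80) = PySem.Str.slice (pvGetD m "content" "") none (some 80)
    then out else out ++ [m]

def pvKeep (m : List (String × String)) : Bool := !(PySem.Str.strip (pvGetD m "content" "") == "")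

-- collapse against the last KEPT element (A's semantics)
def pvCrec : List (List (String × String)) → List (String × String) → List (List (String × String))
  | [], _ => []
  | m :: t, p => if pvKey m = pvKey p then pvCrec t p else m :: pvCrec t m

-- collapse against the ADJACENT previous element (B's semantics)
def pvZrec : List (List (String × String)) → List (String × String) → List (List (String × String))
  | [], _ => []
  | m :: t, p => if pvKey m = pvKey p then pvZrec t m else m :: pvZrec t m

-- B's fold step
def pvStepZ (out : List (List (String × String))) (pc : List (String × String) × List (String × String)) :
    List (List (String × String)) :=
  if pvGet? pc.1 "role" = pvGet? pc.2 "role" ∧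
     PySem.Str.slice (pvGetD pc.1 "content" "") none (some 80) = PySem.Str.slice (pvGetD pc.2 "content" "") none (some 80)
  then out else out ++ [pc.2]

theorem pvFoldA_eq_filter (msgs : List (List (String × String))) (out : List (List (String × String))) :
    msgs.foldl (fun out m =>
      let c := pvGetD m "content" ""
      if PySem.Str.strip c = "" then out
      else
        match out.getLast? with
        | none => out ++ [m]
        | some last =>
          if pvGet? last "role" = pvGet? m "role" ∧
             PySem.Str.slice (pvGetD last "content" "") none (some 80) = PySem.Str.slice c none (some 80)
          then out else out ++ [m]) out
    = (msgs.filter pvKeep).foldl pvStepC out := by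
  induction msgs generalizing out with
  | nil => rfl
  | cons m t ih =>
    by_cases h : PySem.Str.strip (pvGetD m "content" "") = ""
    · simp [List.foldl, List.filter, pvKeep, h, ih]
    · have hb : pvKeep m = true := by simp [pvKeep, h]
      rw [List.foldl_cons, List.filter_cons, ih]
      simp only [hb, if_true, List.foldl_cons]
      congr 1
      simp [pvStepC, h]

theorem pvZrec_congr (l : List (List (String × String))) (p q : List (String × String))
    (h : pvKey p = pvKey q) : pvZrec l p = pvZrec l q := by
  cases l with
  | nil => rfl
  | cons m t => simp [pvZrec, h]

theorem pvCrec_eq_pvZrec (l : List (List (String × String))) (p : List (String × String)) :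
    pvCrec l p = pvZrec l p := by
  induction l generalizing p with
  | nil => rfl
  | cons m t ih =>
    by_cases h : pvKey m = pvKey p
    · simp [pvCrec, pvZrec, h, ih, pvZrec_congr t m p h]
    · simp [pvCrec, pvZrec, h, ih]

theorem pvFoldC_eq_pvCrec (l : List (List (String × String))) (acc : List (List (String × String)))
    (p : List (String × String)) :
    l.foldl pvStepC (acc ++ [p]) = (acc ++ [p]) ++ pvCrec l p := by
  induction l generalizing acc p with
  | nil => simp [pvCrec]
  | cons m t ih =>
    rw [List.foldl_cons]
    have hl : (acc ++ [p]).getLast? = some p := by simp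
    by_cases h : pvKey m = pvKey p
    · have hs : pvStepC (acc ++ [p]) m = acc ++ [p] := by
        simp [pvStepC, hl, (pvCond_iff p m).mpr h.symm]
      rw [hs, ih acc p]
      simp [pvCrec, h]
    · have hc : ¬ (pvGet? p "role" = pvGet? m "role" ∧
          PySem.Str.slice (pvGetD p "content" "") none (some 80) = PySem.Str.slice (pvGetD m "content" "") none (some 80)) := by
        intro hcc; exact h ((pvCond_iff p m).mp hcc).symm
      have hs : pvStepC (acc ++ [p]) m = (acc ++ [p]) ++ [m] := by
        simp [pvStepC, hl, hc]
      rw [hs, ih (acc ++ [p]) m]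
      simp [pvCrec, h]

theorem pvFoldZ_eq_pvZrec (l : List (List (String × String))) (acc : List (List (String × String)))
    (p : List (String × String)) :
    ((p :: l).zip l).foldl pvStepZ acc = acc ++ pvZrec l p := by
  induction l generalizing acc p with
  | nil => simp [pvZrec]
  | cons m t ih =>
    have hz : (p :: m :: t).zip (m :: t) = (p, m) :: ((m :: t).zip t) := rfl
    rw [hz, List.foldl_cons]
    by_cases h : pvKey m = pvKey p
    · have hs : pvStepZ acc (p, m) = acc := by
        simp [pvStepZ, (pvCond_iff p m).mpr h.symm]
      rw [hs, ih acc m]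
      simp [pvZrec, h]
    · have hc : ¬ (pvGet? p "role" = pvGet? m "role" ∧
          PySem.Str.slice (pvGetD p "content" "") none (some 80) = PySem.Str.slice (pvGetD m "content" "") none (some 80)) := by
        intro hcc; exact h ((pvCond_iff p m).mp hcc).symm
      have hs : pvStepZ acc (p, m) = acc ++ [m] := by
        simp [pvStepZ, hc]
      rw [hs, ih (acc ++ [m]) m]
      simp [pvZrec, h]

-- ===== VERDICT (by name: the statement is the Claim_ definition above) =====
theorem snip_py_spec : Claim_equal_snip_py := by
  intro msgs _
  unfold Spec_snip_py snip_py snip_py_alt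
  rw [pvFoldA_eq_filter]
  have hfe : msgs.filter (fun m => !(PySem.Str.strip (pvGetD m "content" "") == "")) = msgs.filter pvKeep := rfl
  rw [show (fun (out : List (List (String × String))) (pc : List (String × String) × List (String × String)) =>
        if pvGet? pc.1 "role" = pvGet? pc.2 "role" ∧
           PySem.Str.slice (pvGetD pc.1 "content" "") none (some 80) = PySem.Str.slice (pvGetD pc.2 "content" "") none (some 80)
        then out else out ++ [pc.2]) = pvStepZ from rfl, hfe]
  cases hk : msgs.filter pvKeep with
  | nil => simp
  | cons h t =>
    have hA : (h :: t).foldl pvStepC ([] : List (List (String × String))) = [h] ++ pvCrec t h := by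
      have h0 : pvStepC [] h = [] ++ [h] := by simp [pvStepC]
      rw [List.foldl_cons, h0]
      simpa using pvFoldC_eq_pvCrec t [] h
    rw [hA]
    simp only [List.tail_cons, List.take_succ_cons, List.take_zero]
    rw [pvFoldZ_eq_pvZrec t [h] h, pvCrec_eq_pvZrec]
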